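-- pv_equiv track=rewrite | github.com/DavidLeoni/sciprog-ds | exams/2019-01-10/solutions/exits_sol.py | exits
-- ===== SOURCE A (Python) =====
-- def exits(cp):
--     """
--         INPUT: a dictionary of nodes representing a visit tree in the
--         child-to-parent format, that is, each key is a node label and
--         as value has its parent as a node label. The root has
--         associated None as parent.
--
--         OUTPUT: a dictionary mapping node labels of exits to a list
--                 of node labels representing the the shortest path from
--                 the root to the exit (root and exit included)
--
--     """
--     #jupman-raise
--     ret = {}
--     for v in cp:
--         if v.startswith('e'):
--             ret[v] = []
--
--     # find traces until source node
--     for v in ret: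
--         u = v
--         while u != None:
--             ret[v].append(u)
--             u = cp[u]
--
--     # reverses
--     for v in ret:
--         ret[v].reverse()
--
--     return ret
-- ===== SOURCE B (Python) =====
-- def exits(cp):
--     def path(u):
--         if u is None:
--             return []
--         return path(cp[u]) + [u]
--
--     return {v: path(v) for v in cp if v.startswith('e')}
-- ===== Notes on version B (the rewrite author's own statement) =====
-- stated objective: simpler
-- what changed: Replaces A's three passes (seed empty lists, append-while-walking-parents, reverse each list) with a single dict comprehension calling a recursive path(u) = path(cp[u]) + [u] that builds each root-to-exit path directly in forward order, with no append loop and no reverse pass.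
import Mathlib
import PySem

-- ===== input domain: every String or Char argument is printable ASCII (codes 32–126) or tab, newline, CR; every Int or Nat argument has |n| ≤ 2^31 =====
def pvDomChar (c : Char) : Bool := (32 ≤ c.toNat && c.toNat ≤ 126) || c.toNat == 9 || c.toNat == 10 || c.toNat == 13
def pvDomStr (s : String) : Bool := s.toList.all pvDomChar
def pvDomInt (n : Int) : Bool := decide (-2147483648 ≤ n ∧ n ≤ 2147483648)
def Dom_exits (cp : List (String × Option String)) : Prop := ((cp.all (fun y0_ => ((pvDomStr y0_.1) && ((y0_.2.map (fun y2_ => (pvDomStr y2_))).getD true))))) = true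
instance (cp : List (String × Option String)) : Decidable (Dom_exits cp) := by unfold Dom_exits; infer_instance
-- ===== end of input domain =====

-- B is SIMPLER: one dict comprehension with a recursive path helper, instead of A's three
-- passes (seed [], append while walking parents, reverse each list).

-- ===== PORT A =====
-- the inner 'while u != None: ret[v].append(u); u = cp[u]' loop, with fuel;
-- a missing parent key (Python: KeyError) stops the loop — such inputs are outside Pre_exits
def exitsTrace (d : PySem.Dict String (Option String)) : Nat → List String → Option String → List String
  | 0, acc, _ => acc
  | _ + 1, acc, none => acc
  | f + 1, acc, some x =>
      match d.get? x with
      | none => acc ++ [x]          -- append happened, then cp[u] raises KeyError (outside Pre_)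
      | some p => exitsTrace d f (acc ++ [x]) p

def exits (cp : List (String × Option String)) : List (String × List String) :=
  let d : PySem.Dict String (Option String) := PySem.Dict.mk cp
  -- ret = {};  for v in cp: if v.startswith('e'): ret[v] = []
  let ret1 : PySem.Dict String (List String) :=
    cp.foldl (fun r p => if PySem.Str.startswith p.1 "e" then r.insert p.1 [] else r) PySem.Dict.empty
  -- for v in ret:  u = v;  while u != None: ret[v].append(u); u = cp[u]
  let ret2 : PySem.Dict String (List String) :=
    ret1.keys.foldl (fun r v => r.insert v (exitsTrace d (cp.length + 1) (r.getD v []) (some v))) ret1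
  -- for v in ret: ret[v].reverse()
  let ret3 : PySem.Dict String (List String) :=
    ret2.keys.foldl (fun r v => r.insert v ((r.getD v []).reverse)) ret2
  ret3.items

-- ===== PORT B =====
-- path(u): [] if u is None else path(cp[u]) + [u], with fuel
def pathB (d : PySem.Dict String (Option String)) : Nat → Option String → List String
  | _, none => []
  | 0, some _ => []
  | f + 1, some x =>
      (match d.get? x with
       | none => []                 -- cp[u] raises KeyError (outside Pre_)
       | some p => pathB d f p) ++ [x]

def exits_alt (cp : List (String × Option String)) : List (String × List String) :=
  let d : PySem.Dict String (Option String) := PySem.Dict.mk cp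
  -- {v: path(v) for v in cp if v.startswith('e')}
  (cp.foldl
      (fun r p => if PySem.Str.startswith p.1 "e" then r.insert p.1 (pathB d (cp.length + 1) (some p.1)) else r)
      (PySem.Dict.empty : PySem.Dict String (List String))).items

-- ===== PRECONDITION & SPEC =====
-- chainOk: the parent chain from u reaches None within the given fuel, never hitting a missing key
def chainOk (cp : List (String × Option String)) : Nat → Option String → Bool
  | _, none => true
  | 0, some _ => false
  | f + 1, some x =>
      match (PySem.Dict.mk cp).get? x with
      | none => false
      | some p => chainOk cp f p

-- Pre_ = the Python-dict invariant (distinct keys) plus: from every exit key the parent chain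
-- reaches None (otherwise Python A raises KeyError on a missing parent, or loops forever on a cycle).
def Pre_exits (cp : List (String × Option String)) : Prop :=
  (cp.map Prod.fst).Nodup ∧
  ∀ v ∈ cp.map Prod.fst, PySem.Str.startswith v "e" = true → chainOk cp (cp.length + 1) (some v) = true
instance (cp : List (String × Option String)) : Decidable (Pre_exits cp) := by unfold Pre_exits; infer_instance

def pvWitness_exits : (List (String × Option String)) := [("r", none), ("a", some "r"), ("e1", some "a"), ("e2", some "r")]

def Spec_exits (cp : List (String × Option String)) (out : List (String × List String)) : Prop := out = exits_alt cp
instance (cp : List (String × Option String)) (out : List (String × List String)) : Decidable (Spec_exits cp out) := by unfold Spec_exits; infer_instance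

-- ===== CLAIM (what is proved, stated in full; the proofs are below) =====
def Claim_equal_exits : Prop := ∀ (cp : List (String × Option String)), Dom_exits cp → Pre_exits cp → Spec_exits cp (exits cp)

-- ===== LEMMAS AND PROOFS =====

-- the accumulator of exitsTrace is a prefix
theorem exitsTrace_acc (d : PySem.Dict String (Option String)) :
    ∀ (f : Nat) (acc : List String) (u : Option String),
      exitsTrace d f acc u = acc ++ exitsTrace d f [] u := by
  intro f
  induction f with
  | zero => intro acc u; simp [exitsTrace]
  | succ f ih =>
      intro acc u
      cases u with
      | none => simp [exitsTrace]
      | some x =>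
          cases h : d.get? x with
          | none => simp [exitsTrace, h]
          | some p =>
              simp only [exitsTrace, h]
              rw [ih (acc ++ [x]) p, ih ([] ++ [x]) p]
              simp

-- B's path is the reverse of A's trace, at equal fuel, on every input
theorem pathB_eq_reverse_trace (d : PySem.Dict String (Option String)) :
    ∀ (f : Nat) (u : Option String),
      pathB d f u = (exitsTrace d f [] u).reverse := by
  intro f
  induction f with
  | zero => intro u; cases u <;> simp [pathB, exitsTrace]
  | succ f ih =>
      intro u
      cases u with
      | none => simp [pathB, exitsTrace]
      | some x =>
          cases h : d.get? x with
          | none => simp [pathB, exitsTrace, h]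
          | some p =>
              simp only [pathB, exitsTrace, h]
              rw [exitsTrace_acc d f ([] ++ [x]) p, ih p]
              simp

-- a conditional insert-fold is the unconditional fold over the filtered list
theorem foldl_if_insert {ν : Type} (c : String → Bool) (val : PySem.Dict String ν → String → ν) :
    ∀ (l : List (String × Option String)) (d : PySem.Dict String ν),
      l.foldl (fun r p => if c p.1 then r.insert p.1 (val r p.1) else r) d
        = (l.map Prod.fst).foldl (fun r v => if c v then r.insert v (val r v) else r) d := by
  intro l
  induction l with
  | nil => intro d; simp
  | cons p l ih => intro d; simp [List.foldl_cons, ih]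

theorem foldl_if_insert_filter {ν : Type} (c : String → Bool) (val : PySem.Dict String ν → String → ν) :
    ∀ (ks : List String) (d : PySem.Dict String ν),
      ks.foldl (fun r v => if c v then r.insert v (val r v) else r) d
        = (ks.filter c).foldl (fun r v => r.insert v (val r v)) d := by
  intro ks
  induction ks with
  | nil => intro d; simp
  | cons v ks ih =>
      intro d
      by_cases h : c v = true <;> simp [List.foldl_cons, h, ih]

-- getD after a fold inserting at each key of a Nodup list
theorem getD_foldl_insert_fun (g : String → List String → List String) :
    ∀ (ks : List String) (d : PySem.Dict String (List String)) (k : String), ks.Nodup →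
      (ks.foldl (fun r v => r.insert v (g v (r.getD v []))) d).getD k []
        = if k ∈ ks then g k (d.getD k []) else d.getD k [] := by
  intro ks
  induction ks with
  | nil => intro d k _; simp
  | cons x ks ih =>
      intro d k hnd
      simp only [List.nodup_cons] at hnd
      simp only [List.foldl_cons]
      rw [ih _ k hnd.2]
      by_cases hk : k ∈ ks
      · have hne : k ≠ x := fun h => hnd.1 (h ▸ hk)
        simp [hk, PySem.Dict.getD_insert, hne]
      · by_cases hkx : k = x
        · subst hkx; simp [hk]
        · simp [hk, hkx, PySem.Dict.getD_insert]

-- keys after a fold inserting at each key of a list already present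
theorem keys_foldl_insert_sub {ν : Type} (f : PySem.Dict String ν → String → ν) :
    ∀ (ks : List String) (d : PySem.Dict String ν), (∀ v ∈ ks, v ∈ d.keys) →
      (ks.foldl (fun r v => r.insert v (f r v)) d).keys = d.keys := by
  intro ks
  induction ks with
  | nil => intro d _; rfl
  | cons x ks ih =>
      intro d h
      simp only [List.foldl_cons]
      rw [ih _ (by
        intro v hv
        rw [PySem.Dict.mem_keys_insert]
        exact Or.inr (h v (List.mem_cons_of_mem _ hv)))]
      rw [PySem.Dict.keys_insert_of_contains]
      rw [PySem.Dict.contains_iff_mem_keys]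
      exact h x (List.mem_cons_self)

-- items of a fold inserting fresh distinct keys from empty
theorem items_fold_fresh (g : String → List String) (ks : List String) (hnd : ks.Nodup) :
    (ks.foldl (fun r v => r.insert v (g v)) (PySem.Dict.empty : PySem.Dict String (List String))).items
      = ks.map (fun v => (v, g v)) := by
  have := PySem.Dict.items_foldl_insert_fresh (l := ks) (k := fun v => v) (v := g)
      (d := (PySem.Dict.empty : PySem.Dict String (List String)))
      (by intro a _; simp [PySem.Dict.contains_empty]) (by simpa using hnd)
  simpa [PySem.Dict.items] using this

theorem keys_fold_fresh (g : String → List String) (ks : List String) (hnd : ks.Nodup) :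
    (ks.foldl (fun r v => r.insert v (g v)) (PySem.Dict.empty : PySem.Dict String (List String))).keys = ks := by
  rw [PySem.Dict.keys, items_fold_fresh g ks hnd]
  simp [Function.comp_def]

-- ===== VERDICT (by name: the statement is the Claim_ definition above) =====
theorem exits_spec : Claim_equal_exits := by
  intro cp _ hpre
  obtain ⟨hnd, -⟩ := hpre
  simp only [Spec_exits, exits, exits_alt]
  set d : PySem.Dict String (Option String) := PySem.Dict.mk cp with hd
  set c : String → Bool := fun v => PySem.Str.startswith v "e" with hc
  set ks : List String := (cp.map Prod.fst).filter c with hks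
  have hksnd : ks.Nodup := hnd.filter c
  -- normalise all four folds to folds over ks
  rw [foldl_if_insert (ν := List String) c (fun _ v => []) cp,
      foldl_if_insert_filter (ν := List String) c (fun _ v => []),
      foldl_if_insert (ν := List String) c (fun _ v => pathB d (cp.length + 1) (some v)) cp,
      foldl_if_insert_filter (ν := List String) c (fun _ v => pathB d (cp.length + 1) (some v))]
  set ret1 := ks.foldl (fun r v => r.insert v []) (PySem.Dict.empty : PySem.Dict String (List String)) with hret1
  have hret1items : ret1.items = ks.map (fun v => (v, ([] : List String))) :=
    items_fold_fresh (fun _ => []) ks hksnd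
  have hret1keys : ret1.keys = ks := keys_fold_fresh (fun _ => []) ks hksnd
  have hret1getD : ∀ k ∈ ks, ret1.getD k [] = [] := by
    intro k hk
    rw [hret1]
    rw [getD_foldl_insert_fun (fun _ _ => []) ks PySem.Dict.empty k hksnd]
    simp [hk]
  set ret2 := ret1.keys.foldl (fun r v => r.insert v (exitsTrace d (cp.length + 1) (r.getD v []) (some v))) ret1 with hret2
  have hret2keys : ret2.keys = ks := by
    rw [hret2, keys_foldl_insert_sub, hret1keys]
    intro v hv; rw [hret1keys] at hv ⊢; exact hv
  have hret2getD : ∀ k ∈ ks, ret2.getD k [] = exitsTrace d (cp.length + 1) [] (some k) := by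
    intro k hk
    rw [hret2, hret1keys,
        getD_foldl_insert_fun (fun v w => exitsTrace d (cp.length + 1) w (some v)) ks ret1 k hksnd]
    simp [hk, hret1getD k hk]
  set ret3 := ret2.keys.foldl (fun r v => r.insert v ((r.getD v []).reverse)) ret2 with hret3
  have hret3keys : ret3.keys = ks := by
    rw [hret3, keys_foldl_insert_sub, hret2keys]
    intro v hv; rw [hret2keys] at hv ⊢; exact hv
  have hret3getD : ∀ k ∈ ks, ret3.getD k [] = (exitsTrace d (cp.length + 1) [] (some k)).reverse := by
    intro k hk
    rw [hret3, hret2keys,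
        getD_foldl_insert_fun (fun _ w => w.reverse) ks ret2 k hksnd]
    simp [hk, hret2getD k hk]
  have hret3items : ret3.items = ks.map (fun k => (k, ret3.getD k [])) := by
    rw [PySem.Dict.items_eq_map_keys ret3 (by rw [hret3keys]; exact hksnd) [], hret3keys]
  rw [hret3items,
      items_fold_fresh (fun v => pathB d (cp.length + 1) (some v)) ks hksnd]
  apply List.map_congr_left
  intro k hk
  rw [hret3getD k hk, pathB_eq_reverse_trace]
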